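-- pv_equiv track=rewrite | github.com/zangzoo/Coding_Test_Site | 프로그래머스/2/42584. 주식가격/주식가격.py | solution
-- ===== SOURCE A (Python) =====
-- def solution(prices):
--     l=len(prices)
--     answer = [0]*l
--
--     for now in range(l-1):
--         for other in range(now+1,l):
--             if prices[now]>prices[other]:
--                 answer[now]+=1
--                 break
--             else:
--                 answer[now]+=1
--     answer[l-1]=0
--     return answer
-- ===== SOURCE B (Python) =====
-- def solution(prices):
--     # Monotonic stack of indices; resolve each index's duration when a strictly
--     # lower price arrives, unresolved indices last until the end.
--     n = len(prices)
--     answer = [0] * n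
--     stack = []
--     for i in range(n):
--         p = prices[i]
--         while stack and prices[stack[-1]] > p:
--             j = stack.pop()
--             answer[j] = i - j
--         stack.append(i)
--     for j in stack:
--         answer[j] = n - 1 - j
--     return answer
-- ===== Notes on version B (the rewrite author's own statement) =====
-- stated objective: faster
-- what changed: Replaced the per-index rescan of the remaining prices (nested loops with break) by a single left-to-right pass with a monotonic stack of unresolved indices, settling each duration when a strictly lower price arrives and finishing the stack at the end.
-- crash fix: On the empty list A raises IndexError (its final write indexes the last element of an empty list) while B returns []. — e.g. on solution([]): A raises IndexError, B returns ([])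
import Mathlib
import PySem

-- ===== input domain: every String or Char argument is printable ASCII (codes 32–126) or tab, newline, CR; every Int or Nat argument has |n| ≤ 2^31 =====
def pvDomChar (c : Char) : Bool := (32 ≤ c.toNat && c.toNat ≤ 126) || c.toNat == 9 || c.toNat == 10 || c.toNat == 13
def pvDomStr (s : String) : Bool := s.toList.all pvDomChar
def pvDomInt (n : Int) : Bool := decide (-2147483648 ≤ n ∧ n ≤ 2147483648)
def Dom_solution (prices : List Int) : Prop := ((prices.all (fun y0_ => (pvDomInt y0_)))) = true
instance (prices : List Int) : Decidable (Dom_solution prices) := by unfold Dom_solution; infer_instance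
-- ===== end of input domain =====

-- B replaces A's quadratic per-index rescan by a single monotonic-stack pass (asymptotically faster).


-- ===== PORT A =====
-- inner loop `for other in range(now+1,l): … break …`: counts 1 per visited index,
-- stopping (inclusively) at the first strictly smaller price.  Indices come from
-- ranges so they are in bounds; prices[o] is ported as getD o 0 (exact here).
def aInner (prices : List Int) (pnow : Int) : Int → List Nat → Int
  | acc, [] => acc
  | acc, o :: rest =>
    if pnow > prices.getD o 0 then acc + 1
    else aInner prices pnow (acc + 1) rest

-- A fills answer[now] independently for each now (answer[l-1] stays 0, and the
-- final `answer[l-1] = 0` rewrites 0; on [] that statement raises — see Pre_).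
-- range(now+1, l) is List.range' (now+1) (l-(now+1)).
def solution (prices : List Int) : List Int :=
  let l := prices.length
  (List.range l).map (fun now =>
    aInner prices (prices.getD now 0) 0 (List.range' (now + 1) (l - (now + 1))))

-- ===== PORT B =====
-- `while stack and prices[stack[-1]] > p: j = stack.pop(); answer[j] = i - j`
-- (stack is a Lean list, head = Python's stack[-1])
def popLoop (prices : List Int) (i : Nat) (p : Int) : List Int → List Nat → List Int × List Nat
  | answer, [] => (answer, [])
  | answer, j :: s =>
    if prices.getD j 0 > p then popLoop prices i p (answer.set j ((i : Int) - (j : Int))) s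
    else (answer, j :: s)

-- `for i in range(n): p = prices[i]; …pop…; stack.append(i)`
def bMain (prices : List Int) : List Nat → List Int → List Nat → List Int × List Nat
  | [], answer, stack => (answer, stack)
  | i :: rest, answer, stack =>
    let p := prices.getD i 0
    let r := popLoop prices i p answer stack
    bMain prices rest r.1 (i :: r.2)

-- `for j in stack: answer[j] = n - 1 - j` (distinct indices, order immaterial)
def finishLoop (n : Nat) : List Int → List Nat → List Int
  | answer, [] => answer
  | answer, j :: s => finishLoop n (answer.set j ((n : Int) - 1 - (j : Int))) s

def solution_alt (prices : List Int) : List Int :=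
  let n := prices.length
  let r := bMain prices (List.range n) (List.replicate n 0) []
  finishLoop n r.1 r.2

-- ===== PRECONDITION & SPEC =====
-- Pre_ excludes only the empty list, on which A raises IndexError on its final write to the last element.
def Pre_solution (prices : List Int) : Prop := prices ≠ []
instance (prices : List Int) : Decidable (Pre_solution prices) := by unfold Pre_solution; infer_instance
def pvWitness_solution : List Int := ([1, 2, 3, 2, 3])

-- On the empty list A raises IndexError (its final write indexes the last element of an empty list) while B returns [].
def Raises_solution (prices : List Int) : Prop := prices = []
instance (prices : List Int) : Decidable (Raises_solution prices) := by unfold Raises_solution; infer_instance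
def pvRaiseWitness_solution : List Int := ([])
def pvRaiseWitnessOut_solution : List Int := ([])

def Spec_solution (prices : List Int) (out : List Int) : Prop := out = solution_alt prices
instance (prices : List Int) (out : List Int) : Decidable (Spec_solution prices out) := by unfold Spec_solution; infer_instance

-- ===== CLAIM (what is proved, stated in full; the proofs are below) =====
def Claim_equal_solution : Prop := ∀ (prices : List Int), Dom_solution prices → Pre_solution prices → Spec_solution prices (solution prices)
def Claim_raises_solution : Prop := (∀ (prices : List Int), Dom_solution prices → Raises_solution prices → ¬ Pre_solution prices) ∧ (Dom_solution (pvRaiseWitness_solution) ∧ Raises_solution (pvRaiseWitness_solution) ∧ solution_alt (pvRaiseWitness_solution) = pvRaiseWitnessOut_solution)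

-- ===== LEMMAS AND PROOFS =====

-- the common specification: answer[j] = (first k > j with prices[k] < prices[j]) - j,
-- or (n-1) - j when no such k exists
def firstDrop (prices : List Int) (j : Nat) : Option Nat :=
  (List.range' (j + 1) (prices.length - (j + 1))).find?
    (fun k => decide (prices.getD k 0 < prices.getD j 0))

def dur (prices : List Int) (j : Nat) : Int :=
  match firstDrop prices j with
  | some k => (k : Int) - (j : Int)
  | none => (prices.length : Int) - 1 - (j : Int)

-- getD after set
theorem getD_set_eq (l : List Int) (j k : Nat) (v : Int) (hj : j < l.length) :
    (l.set j v).getD k 0 = if j = k then v else l.getD k 0 := by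
  rw [List.getD_eq_getElem?_getD, List.getD_eq_getElem?_getD, List.getElem?_set]
  split_ifs with h
  · subst h; simp
  · rfl

-- ----- A side -----

theorem aInner_spec (prices : List Int) (x : Int) :
    ∀ (c m : Nat) (acc : Int),
      aInner prices x acc (List.range' m c) =
        acc + (match (List.range' m c).find? (fun k => decide (prices.getD k 0 < x)) with
               | some k => (k : Int) - (m : Int) + 1
               | none => (c : Int)) := by
  intro c
  induction c with
  | zero => intro m acc; simp [aInner]
  | succ c ih =>
    intro m acc
    rw [List.range'_succ]
    by_cases h : prices.getD m 0 < x
    · rw [List.find?_cons_of_pos (by simpa using h)]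
      simp only [aInner, gt_iff_lt, if_pos h]
      ring
    · rw [List.find?_cons_of_neg (by simpa using h)]
      simp only [aInner, gt_iff_lt, if_neg h]
      rw [ih (m + 1) (acc + 1)]
      cases hf : (List.range' (m + 1) c).find? (fun k => decide (prices.getD k 0 < x)) with
      | none => push_cast; ring
      | some k => push_cast; ring

theorem solution_eq_map_dur (prices : List Int) :
    solution prices = (List.range prices.length).map (dur prices) := by
  unfold solution
  refine List.map_congr_left (fun now hnow => ?_)
  have hn : now < prices.length := List.mem_range.mp hnow
  rw [aInner_spec prices (prices.getD now 0) (prices.length - (now + 1)) (now + 1) 0]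
  unfold dur firstDrop
  cases hf : (List.range' (now + 1) (prices.length - (now + 1))).find?
      (fun k => decide (prices.getD k 0 < prices.getD now 0)) with
  | none =>
    rw [Nat.cast_sub (show now + 1 ≤ prices.length by omega)]
    push_cast; ring
  | some k => push_cast; ring

-- ----- B side -----

-- loop invariant after processing indices < i
def StackInv (prices : List Int) (i : Nat) (answer : List Int) (stack : List Nat) : Prop :=
  answer.length = prices.length ∧
  stack.Pairwise (fun a b => b < a ∧ prices.getD b 0 ≤ prices.getD a 0) ∧
  (∀ j ∈ stack, j < i) ∧
  (∀ j ∈ stack, ∀ k, j < k → k < i → ¬ (prices.getD k 0 < prices.getD j 0)) ∧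
  (∀ j, j < i → j ∉ stack → answer.getD j 0 = dur prices j)

theorem find?_range'_eq_some (pr : Nat → Bool) (i : Nat) :
    ∀ (c s : Nat), s ≤ i → i < s + c → pr i = true →
      (∀ k, s ≤ k → k < i → pr k = false) →
      (List.range' s c).find? pr = some i := by
  intro c
  induction c with
  | zero => intro s h1 h2; omega
  | succ c ih =>
    intro s h1 h2 hi hk
    rw [List.range'_succ]
    by_cases hs : s = i
    · subst hs; rw [List.find?_cons_of_pos hi]
    · rw [List.find?_cons_of_neg (by simp [hk s le_rfl (by omega)])]
      exact ih (s + 1) (by omega) (by omega) hi (fun k hk1 hk2 => hk k (by omega) hk2)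

theorem firstDrop_eq_some (prices : List Int) (j i : Nat) (hji : j < i)
    (hin : i < prices.length)
    (hdrop : prices.getD i 0 < prices.getD j 0)
    (hmin : ∀ k, j < k → k < i → ¬ (prices.getD k 0 < prices.getD j 0)) :
    firstDrop prices j = some i := by
  unfold firstDrop
  refine find?_range'_eq_some _ i (prices.length - (j + 1)) (j + 1) (by omega) (by omega)
    (by simpa using hdrop) (fun k hk1 hk2 => ?_)
  simpa using hmin k (by omega) hk2

theorem firstDrop_eq_none (prices : List Int) (j : Nat)
    (hmin : ∀ k, j < k → k < prices.length → ¬ (prices.getD k 0 < prices.getD j 0)) :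
    firstDrop prices j = none := by
  unfold firstDrop
  rw [List.find?_eq_none]
  intro k hk
  have := List.mem_range'_1.mp hk
  simpa using hmin k (by omega) (by omega)

theorem popLoop_inv (prices : List Int) (i : Nat) (hin : i < prices.length) :
    ∀ (stack : List Nat) (answer : List Int),
      StackInv prices i answer stack →
      StackInv prices i (popLoop prices i (prices.getD i 0) answer stack).1
        (popLoop prices i (prices.getD i 0) answer stack).2 ∧
      (∀ j ∈ (popLoop prices i (prices.getD i 0) answer stack).2,
        ¬ (prices.getD i 0 < prices.getD j 0)) := by
  intro stack
  induction stack with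
  | nil => intro answer hInv; simpa [popLoop] using hInv
  | cons j s ih =>
    intro answer hInv
    obtain ⟨hlen, hpw, hlt, hnod, hset⟩ := hInv
    have hji : j < i := hlt j (by simp)
    have hjn : j < prices.length := by omega
    by_cases h : prices.getD j 0 > prices.getD i 0
    · -- pop j, settle answer[j] = i - j
      have hdur : dur prices j = (i : Int) - (j : Int) := by
        rw [dur, firstDrop_eq_some prices j i hji hin h
          (fun k hk1 hk2 => hnod j (by simp) k hk1 hk2)]
      have hInv' : StackInv prices i (answer.set j ((i : Int) - (j : Int))) s := by
        refine ⟨by simpa using hlen, (List.pairwise_cons.mp hpw).2,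
          fun b hb => hlt b (by simp [hb]),
          fun b hb => hnod b (by simp [hb]), fun j' hj' hj's => ?_⟩
        rw [getD_set_eq answer j j' _ (by omega)]
        split_ifs with he
        · rw [← he, hdur]
        · exact hset j' hj'
            (fun hc => (List.mem_cons.mp hc).elim (fun hej => he hej.symm) hj's)
      have hrec := ih _ hInv'
      simp only [popLoop]
      rw [if_pos h]
      exact hrec
    · -- stop: head already not poppable
      have hstop : prices.getD j 0 ≤ prices.getD i 0 := by omega
      simp only [popLoop]
      rw [if_neg h]
      refine ⟨⟨hlen, hpw, hlt, hnod, hset⟩, ?_⟩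
      intro b hb
      rcases List.mem_cons.mp hb with rfl | hbs
      · omega
      · have := ((List.pairwise_cons.mp hpw).1 b hbs).2
        omega

theorem step_inv (prices : List Int) (i : Nat) (hin : i < prices.length)
    (answer : List Int) (stack : List Nat)
    (hInv : StackInv prices i answer stack)
    (hnd : ∀ j ∈ stack, ¬ (prices.getD i 0 < prices.getD j 0)) :
    StackInv prices (i + 1) answer (i :: stack) := by
  obtain ⟨hlen, hpw, hlt, hnod, hset⟩ := hInv
  refine ⟨hlen, List.pairwise_cons.mpr ⟨fun b hb => ⟨hlt b hb, by have := hnd b hb; omega⟩, hpw⟩,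
    ?_, ?_, ?_⟩
  · intro j hj
    rcases List.mem_cons.mp hj with rfl | hj <;> [omega; exact Nat.lt_succ_of_lt (hlt j hj)]
  · intro j hj k hk1 hk2
    rcases List.mem_cons.mp hj with rfl | hjs
    · omega
    · by_cases hki : k < i
      · exact hnod j hjs k hk1 hki
      · have hke : k = i := by omega
        rw [hke]
        exact hnd j hjs
  · intro j hj hjn
    have hne : j ≠ i := fun he => hjn (by simp [he])
    exact hset j (by omega) (fun hm => hjn (by simp [hm]))

theorem bMain_inv (prices : List Int) :
    ∀ (c i : Nat) (answer : List Int) (stack : List Nat),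
      i + c = prices.length → StackInv prices i answer stack →
      StackInv prices prices.length
        (bMain prices (List.range' i c) answer stack).1
        (bMain prices (List.range' i c) answer stack).2 := by
  intro c
  induction c with
  | zero =>
    intro i answer stack hc hInv
    have : i = prices.length := by omega
    subst this
    simpa [bMain] using hInv
  | succ c ih =>
    intro i answer stack hc hInv
    have hin : i < prices.length := by omega
    rw [List.range'_succ]
    obtain ⟨hInv', hnd⟩ := popLoop_inv prices i hin stack answer hInv
    simpa [bMain] using ih (i + 1) _ _ (by omega) (step_inv prices i hin _ _ hInv' hnd)

theorem finishLoop_spec (prices : List Int) :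
    ∀ (stack : List Nat) (answer : List Int),
      StackInv prices prices.length answer stack →
      finishLoop prices.length answer stack = (List.range prices.length).map (dur prices) := by
  intro stack
  induction stack with
  | nil =>
    intro answer hInv
    obtain ⟨hlen, -, -, -, hset⟩ := hInv
    simp only [finishLoop]
    refine List.ext_getElem (by simpa using hlen) (fun j h1 h2 => ?_)
    have hj : j < prices.length := by simpa using h2
    have := hset j hj (by simp)
    rw [List.getD_eq_getElem?_getD, List.getElem?_eq_getElem h1] at this
    simpa using this
  | cons j s ih =>
    intro answer hInv
    obtain ⟨hlen, hpw, hlt, hnod, hset⟩ := hInv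
    have hjn : j < prices.length := hlt j (by simp)
    have hdur : dur prices j = (prices.length : Int) - 1 - (j : Int) := by
      rw [dur, firstDrop_eq_none prices j (fun k hk1 hk2 => hnod j (by simp) k hk1 hk2)]
    simp only [finishLoop]
    refine ih _ ⟨by simpa using hlen, (List.pairwise_cons.mp hpw).2,
      fun b hb => hlt b (by simp [hb]), fun b hb => hnod b (by simp [hb]),
      fun j' hj' hj's => ?_⟩
    rw [getD_set_eq answer j j' _ (by omega)]
    split_ifs with he
    · rw [← he, hdur]
    · exact hset j' hj'
        (fun hc => (List.mem_cons.mp hc).elim (fun hej => he hej.symm) hj's)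

theorem solution_alt_eq_map_dur (prices : List Int) :
    solution_alt prices = (List.range prices.length).map (dur prices) := by
  have hInv0 : StackInv prices 0 (List.replicate prices.length 0) [] :=
    ⟨by simp, List.Pairwise.nil, by simp, by simp,
      fun j hj _ => absurd hj (Nat.not_lt_zero j)⟩
  simp only [solution_alt]
  conv_lhs => rw [List.range_eq_range']
  exact finishLoop_spec prices _ _
    (bMain_inv prices prices.length 0 (List.replicate prices.length 0) []
      (Nat.zero_add _) hInv0)

-- ===== VERDICT (by name: the statement is the Claim_ definition above) =====
theorem solution_spec : Claim_equal_solution := by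
  intro prices _ _
  unfold Spec_solution
  rw [solution_eq_map_dur, solution_alt_eq_map_dur]

theorem solution_raises : Claim_raises_solution := by
  unfold Claim_raises_solution
  exact ⟨fun prices _ h => by simp [Raises_solution, Pre_solution] at *; exact h, by decide⟩

-- self-check: the raises-witness value is the one recorded in pvRaiseWitnessOut_solution
theorem solution_raises_witness_ok :
    solution_alt pvRaiseWitness_solution = pvRaiseWitnessOut_solution :=
  solution_raises.2.2.2
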